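-- pv_equiv track=rewrite | github.com/alberttluo/wordhuntbot | wordhuntsolverBASIC.py | find_duplicate_letters
-- ===== SOURCE A (Python) =====
-- def find_duplicate_letters(positions):
--     letter_positions = {}  # Dictionary to store the duplicate letters and their positions
--
--     # Iterate over each position and letter in the positions dictionary
--     for position, letter in positions.items():
--         if letter not in letter_positions:
--             letter_positions[letter] = [position]
--         else:
--             letter_positions[letter].append(position)
--
--     # Filter the dictionary to include only the duplicate letters and their positions
--     duplicate_letters = {letter: positions for letter, positions in letter_positions.items() if len(positions) > 1}
--
--     return duplicate_letters
-- ===== SOURCE B (Python) =====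
-- def find_duplicate_letters(positions):
--     items = list(positions.items())
--
--     # Distinct letters in first-occurrence order.
--     letters = []
--     for _, letter in items:
--         if letter not in letters:
--             letters.append(letter)
--
--     # For each distinct letter, rescan the items for its positions; keep it only if duplicated.
--     duplicate_letters = {}
--     for letter in letters:
--         pts = [position for position, x in items if x == letter]
--         if len(pts) > 1:
--             duplicate_letters[letter] = pts
--
--     return duplicate_letters
-- ===== Notes on version B (the rewrite author's own statement) =====
-- stated objective: alternative
-- what changed: B first computes the distinct letters in first-occurrence order and then, per distinct letter, rescans the items to collect that letter's positions (kept only if more than one), instead of A's single grouping pass into a dict of lists followed by a filtering comprehension.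
import Mathlib
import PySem

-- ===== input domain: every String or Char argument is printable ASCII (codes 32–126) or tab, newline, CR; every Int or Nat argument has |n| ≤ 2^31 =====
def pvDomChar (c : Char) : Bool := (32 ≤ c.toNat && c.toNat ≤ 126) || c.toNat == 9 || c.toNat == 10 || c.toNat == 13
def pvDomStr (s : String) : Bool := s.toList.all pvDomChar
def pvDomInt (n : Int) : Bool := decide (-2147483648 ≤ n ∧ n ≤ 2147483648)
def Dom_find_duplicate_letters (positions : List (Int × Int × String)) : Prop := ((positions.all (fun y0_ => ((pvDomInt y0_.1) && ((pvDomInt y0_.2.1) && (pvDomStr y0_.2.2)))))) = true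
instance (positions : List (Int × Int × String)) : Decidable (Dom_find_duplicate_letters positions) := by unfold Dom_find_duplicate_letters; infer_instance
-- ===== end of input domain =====

-- B lists the distinct letters in first-occurrence order and rescans the items once per
-- distinct letter (alternative decomposition, O(n*k) vs A's O(n); return value proved equal).


-- ===== PORT A =====
-- dict iteration = list order; '[letter].append' ported as Dict.modify (in-place list growth);
-- the final dict comprehension over items with unique keys is the filtered items list.
def find_duplicate_letters (positions : List (Int × Int × String)) : List (String × List (Int × Int)) :=
  let letter_positions : PySem.Dict String (List (Int × Int)) :=
    positions.foldl (fun d p =>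
      if d.contains p.2.2 = false then
        d.insert p.2.2 [(p.1, p.2.1)]
      else
        d.modify p.2.2 [] (fun old => old ++ [(p.1, p.2.1)])) PySem.Dict.empty
  letter_positions.items.filter (fun kv => decide (1 < kv.2.length))

-- ===== PORT B =====
-- 'if letter not in letters: letters.append(letter)' is PySem.Set.add; the per-letter
-- comprehension is filter-then-map; dict insertion over the distinct letters, then .items.
def find_duplicate_letters_alt (positions : List (Int × Int × String)) : List (String × List (Int × Int)) :=
  let items : List ((Int × Int) × String) := positions.map (fun p => ((p.1, p.2.1), p.2.2))
  let letters : List String := items.foldl (fun acc q => PySem.Set.add acc q.2) PySem.Set.empty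
  let duplicate_letters : PySem.Dict String (List (Int × Int)) :=
    letters.foldl (fun d letter =>
      let pts := (items.filter (fun q => q.2 == letter)).map (·.1)
      if 1 < pts.length then d.insert letter pts else d) PySem.Dict.empty
  duplicate_letters.items

-- ===== PRECONDITION & SPEC =====
def Spec_find_duplicate_letters (positions : List (Int × Int × String)) (out : List (String × List (Int × Int))) : Prop := out = find_duplicate_letters_alt positions
instance (positions : List (Int × Int × String)) (out : List (String × List (Int × Int))) : Decidable (Spec_find_duplicate_letters positions out) := by unfold Spec_find_duplicate_letters; infer_instance

-- ===== CLAIM (what is proved, stated in full; the proofs are below) =====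
def Claim_equal_find_duplicate_letters : Prop := ∀ (positions : List (Int × Int × String)), Dom_find_duplicate_letters positions → Spec_find_duplicate_letters positions (find_duplicate_letters positions)

-- ===== LEMMAS AND PROOFS =====

-- A's branch 'if letter not in d then d[letter]=[pos] else append' is exactly Dict.modify.
theorem pv_step_eq (d : PySem.Dict String (List (Int × Int))) (k : String) (v : Int × Int) :
    (if d.contains k = false then d.insert k [v] else d.modify k [] (fun old => old ++ [v]))
      = d.modify k [] (fun old => old ++ [v]) := by
  by_cases h : d.contains k = false
  · rw [if_pos h, PySem.Dict.modify, PySem.Dict.getD_of_not_contains d [] h, List.nil_append]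
  · rw [if_neg h]

-- a guarded fold is the fold over the filtered list
theorem pv_foldl_guard {α β : Type} (c : β → Bool) (g : α → β → α) :
    ∀ (l : List β) (init : α),
      l.foldl (fun a b => if c b then g a b else a) init = (l.filter c).foldl g init := by
  intro l
  induction l with
  | nil => intro init; rfl
  | cons x l ih =>
    intro init
    by_cases h : c x = true
    · rw [List.foldl_cons, if_pos h, List.filter_cons_of_pos h, List.foldl_cons, ih]
    · rw [List.foldl_cons, if_neg h, List.filter_cons_of_neg h, ih]

-- A's grouping-by-letter fold, characterised: keys in first-occurrence order, values grouped
theorem pv_group_items (pl : List (String × (Int × Int))) :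
    (pl.foldl (fun d q => d.modify q.1 [] (fun old => old ++ [q.2])) PySem.Dict.empty).items
      = (PySem.Set.ofList (pl.map (·.1))).map
          (fun k => (k, (pl.filter (fun q => q.1 == k)).map (·.2))) := by
  have hnodup : ((pl.foldl (fun d q => d.modify q.1 [] (fun old => old ++ [q.2]))
      PySem.Dict.empty)).keys.Nodup := by
    apply PySem.Dict.nodup_keys_foldl_modify_key pl (·.1) [] (fun _ q => (fun old => old ++ [q.2]))
    simp [PySem.Dict.empty, PySem.Dict.keys]
  have hkeys : ((pl.foldl (fun d q => d.modify q.1 [] (fun old => old ++ [q.2]))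
      PySem.Dict.empty)).keys = PySem.Set.ofList (pl.map (·.1)) := by
    rw [PySem.Dict.keys_foldl_modify_key pl (·.1) [] (fun _ q => (fun old => old ++ [q.2]))]
    have hemp : (PySem.Dict.empty : PySem.Dict String (List (Int × Int))).keys = [] := by
      simp [PySem.Dict.empty, PySem.Dict.keys]
    rw [hemp, PySem.Set.update_nil_left]
  rw [PySem.Dict.items_eq_map_keys _ hnodup [], hkeys]
  apply List.map_congr_left
  intro k _
  rw [PySem.Dict.getD_foldl_modify_append pl PySem.Dict.empty k]
  simp [PySem.Dict.getD_empty]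

theorem find_duplicate_letters_eq_alt (positions : List (Int × Int × String)) :
    find_duplicate_letters positions = find_duplicate_letters_alt positions := by
  unfold find_duplicate_letters find_duplicate_letters_alt
  dsimp only
  set pl : List (String × (Int × Int)) :=
    positions.map (fun p => ((p.2.2 : String), ((p.1, p.2.1) : Int × Int))) with hpl
  set items : List ((Int × Int) × String) :=
    positions.map (fun p => ((p.1, p.2.1), p.2.2)) with hitems
  set ls : List String := positions.map (·.2.2) with hls
  -- the two per-letter position lists coincide (both are a filter of positions, then projected)
  have hpts : ∀ k : String,
      (pl.filter (fun q => q.1 == k)).map (·.2)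
        = (items.filter (fun q => q.2 == k)).map (·.1) := by
    intro k
    rw [hpl, hitems, List.filter_map, List.filter_map, List.map_map, List.map_map]
    rfl
  -- A's loop: the branch step is Dict.modify, and the fold over positions is a fold over pl
  have hA : (positions.foldl (fun d p =>
        if d.contains p.2.2 = false then d.insert p.2.2 [(p.1, p.2.1)]
        else d.modify p.2.2 [] (fun old => old ++ [(p.1, p.2.1)])) PySem.Dict.empty)
      = pl.foldl (fun d q => d.modify q.1 [] (fun old => old ++ [q.2])) PySem.Dict.empty := by
    rw [hpl, List.foldl_map]
    exact PySem.List.foldl_congr_mem positions _ _ _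
      (fun d p _ => pv_step_eq d p.2.2 (p.1, p.2.1))
  -- B's distinct-letter list is the ordered dedup of the letter sequence
  have hletters : items.foldl (fun acc q => PySem.Set.add acc q.2) PySem.Set.empty
      = PySem.Set.ofList ls := by
    rw [PySem.Set.ofList, hls, hitems, List.foldl_map, List.foldl_map]
  set c : String → Bool :=
    fun k => decide (1 < ((items.filter (fun q => q.2 == k)).map (·.1)).length) with hc
  have hnd : (PySem.Set.ofList ls).Nodup := PySem.Set.nodup_ofList ls
  -- B's guarded insertion loop over distinct letters appends exactly the kept letters
  have hB : ((PySem.Set.ofList ls).foldl (fun d letter =>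
        if 1 < ((items.filter (fun q => q.2 == letter)).map (·.1)).length then
          d.insert letter ((items.filter (fun q => q.2 == letter)).map (·.1))
        else d) (PySem.Dict.empty : PySem.Dict String (List (Int × Int)))).items
      = ((PySem.Set.ofList ls).filter c).map
          (fun k => (k, (items.filter (fun q => q.2 == k)).map (·.1))) := by
    have h1 := pv_foldl_guard c
      (fun (d : PySem.Dict String (List (Int × Int))) (letter : String) =>
        d.insert letter ((items.filter (fun q => q.2 == letter)).map (·.1)))
      (PySem.Set.ofList ls) PySem.Dict.empty
    rw [show (fun (d : PySem.Dict String (List (Int × Int))) (letter : String) =>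
          if 1 < ((items.filter (fun q => q.2 == letter)).map (·.1)).length then
            d.insert letter ((items.filter (fun q => q.2 == letter)).map (·.1))
          else d)
        = (fun d letter => if c letter then
            d.insert letter ((items.filter (fun q => q.2 == letter)).map (·.1)) else d) by
      funext d letter; rw [hc]; simp]
    rw [h1]
    rw [PySem.Dict.items_foldl_insert_fresh ((PySem.Set.ofList ls).filter c) (fun a => a)
      (fun k => (items.filter (fun q => q.2 == k)).map (·.1)) PySem.Dict.empty
      (fun a _ => PySem.Dict.contains_empty a) (by simpa using hnd.filter c)]
    simp [PySem.Dict.empty]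
  rw [hA, hletters, hB, pv_group_items]
  have hplfst : pl.map (·.1) = ls := by
    rw [hpl, List.map_map, hls]; rfl
  rw [hplfst, List.filter_map]
  have hcond : ((fun kv : String × List (Int × Int) => decide (1 < kv.2.length)) ∘
      (fun k => (k, (pl.filter (fun q => q.1 == k)).map (·.2)))) = c := by
    funext k
    simp only [Function.comp, hc, hpts k]
  rw [hcond]
  apply List.map_congr_left
  intro k _
  rw [hpts k]

-- ===== VERDICT (by name: the statement is the Claim_ definition above) =====
theorem find_duplicate_letters_spec : Claim_equal_find_duplicate_letters := by
  intro positions _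
  unfold Spec_find_duplicate_letters
  exact find_duplicate_letters_eq_alt positions
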